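-- pv_equiv track=rewrite | github.com/mgjenero/AdventOfCode-2023 | day14_part1.py | total_load
-- ===== SOURCE A (Python) =====
-- def total_load(input):
--     matrix = [[char for char in line] for line in input]
--     matrix = list(list(l) for l in zip(*matrix))
--     for r in range(len(matrix)):
--         prev = 0
--         count = 0
--         for c in range(len(matrix[0])):
--             if matrix[r][c] == "O":
--                 matrix[r][c] = "."
--                 count += 1
--             elif matrix[r][c] == "#":
--                 matrix[r][prev:prev+count] = ["O"]*count
--                 count = 0
--                 prev = c+1
--         if count > 0:
--             matrix[r][prev:prev+count] = ["O"]*count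
--     points = 0
--     for r in range(len(matrix)):
--         for c in range(len(matrix[0])):
--             if matrix[r][c] == "O":
--                 points += len(matrix[0])-c
--
--     return points
-- ===== SOURCE B (Python) =====
-- def total_load(input):
--     R = len(input)
--     if R == 0:
--         return 0
--     C = min(len(line) for line in input)
--     total = 0
--     for j in range(C):
--         next_free = 0
--         for i in range(R):
--             ch = input[i][j]
--             if ch == "O":
--                 total += R - next_free
--                 next_free += 1
--             elif ch == "#":
--                 next_free = i + 1
--     return total
-- ===== Notes on version B (the rewrite author's own statement) =====
-- stated objective: simpler
-- what changed: B drops A's transpose / in-place roll simulation / full rescan: it makes one accumulating pass per column over the unmodified input strings, adding R - next_free for each 'O' directly, so no intermediate matrices are built (constant-factor speedup measured).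
import Mathlib
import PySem

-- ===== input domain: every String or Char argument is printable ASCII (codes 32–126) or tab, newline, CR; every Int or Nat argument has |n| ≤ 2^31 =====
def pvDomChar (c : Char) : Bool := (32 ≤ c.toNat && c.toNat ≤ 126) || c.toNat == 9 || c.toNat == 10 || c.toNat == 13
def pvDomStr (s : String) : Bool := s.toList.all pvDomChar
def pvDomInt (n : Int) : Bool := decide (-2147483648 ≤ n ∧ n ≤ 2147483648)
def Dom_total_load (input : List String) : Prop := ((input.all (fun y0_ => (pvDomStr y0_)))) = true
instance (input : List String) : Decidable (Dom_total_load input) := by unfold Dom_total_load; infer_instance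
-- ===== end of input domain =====

-- B replaces A's transpose + in-place roll + rescan with a single accumulating pass per column (simpler decomposition, no mutation).

-- ===== PORT A =====
-- slice assignment matrix[r][prev:prev+count] = ["O"]*count (exact when prev+count ≤ length, which holds on every reachable state)
def pvFill (row : List Char) (prev count : Nat) : List Char :=
  row.take prev ++ List.replicate count 'O' ++ row.drop (prev + count)

-- body of A's inner rolling loop over column index c (state: row, prev, count)
def pvStep (st : List Char × Nat × Nat) (c : Nat) : List Char × Nat × Nat :=
  if st.1.getD c ' ' = 'O' then (st.1.set c '.', st.2.1, st.2.2 + 1)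
  else if st.1.getD c ' ' = '#' then (pvFill st.1 st.2.1 st.2.2, c + 1, 0)
  else st

-- trailing 'if count > 0' fill after the loop
def pvFinish (st : List Char × Nat × Nat) : List Char :=
  if 0 < st.2.2 then pvFill st.1 st.2.1 st.2.2 else st.1

def pvRoll (n : Nat) (row : List Char) : List Char :=
  pvFinish ((List.range n).foldl pvStep (row, 0, 0))

-- zip(*matrix): list of columns, truncated to the shortest row (hand port, exact; for m = [] the
-- min?-default 0 yields [], which is zip() of no arguments)
def pvZipStar (m : List (List Char)) : List (List Char) :=
  (List.range (((m.map List.length).min?).getD 0)).map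
    (fun j => m.map (fun row => row.getD j ' '))

def total_load (input : List String) : Int :=
  let matrix0 := input.map (fun line => line.toList)
  let matrix1 := pvZipStar matrix0
  let n := (matrix1.headD []).length
  let matrix := matrix1.map (pvRoll n)
  matrix.foldl (fun pts row =>
    (List.range n).foldl (fun (pts : Int) (c : Nat) =>
      if row.getD c ' ' = 'O' then pts + ((n : Int) - (c : Int)) else pts) pts) 0

-- ===== PORT B =====
def total_load_alt (input : List String) : Int :=
  let R := input.length
  if R = 0 then 0 else
  let C := ((input.map (fun l => l.toList.length)).min?).getD 0
  (List.range C).foldl (fun total j =>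
    ((List.zipIdx input).foldl (fun (st : Int × Nat) li =>
        if li.1.toList.getD j ' ' = 'O' then (st.1 + ((R : Int) - (st.2 : Int)), st.2 + 1)
        else if li.1.toList.getD j ' ' = '#' then (st.1, li.2 + 1)
        else st) (total, 0)).1) 0

-- ===== PRECONDITION & SPEC =====
def Spec_total_load (input : List String) (out : Int) : Prop := out = total_load_alt input
instance (input : List String) (out : Int) : Decidable (Spec_total_load input out) := by unfold Spec_total_load; infer_instance

-- ===== CLAIM (what is proved, stated in full; the proofs are below) =====
def Claim_equal_total_load : Prop := ∀ (input : List String), Dom_total_load input → Spec_total_load input (total_load input)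

-- ===== LEMMAS AND PROOFS =====

-- score of a row whose entries sit at absolute positions i, i+1, …, with weight n - position for each 'O'
def scoreIdx (n : Nat) : Nat → List Char → Int
  | _, [] => 0
  | i, h :: t => (if h = 'O' then (n : Int) - (i : Int) else 0) + scoreIdx n (i + 1) t

-- B's inner loop as a structural recursion (i = absolute row index, nf = next free slot)
def bLoop (n : Nat) : Nat → Nat → List Char → Int
  | _, _, [] => 0
  | i, nf, h :: t =>
    if h = 'O' then ((n : Int) - (nf : Int)) + bLoop n (i + 1) (nf + 1) t
    else if h = '#' then bLoop n (i + 1) (i + 1) t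
    else bLoop n (i + 1) nf t

theorem scoreIdx_append (n : Nat) (a : List Char) : ∀ (b : List Char) (i : Nat),
    scoreIdx n i (a ++ b) = scoreIdx n i a + scoreIdx n (i + a.length) b := by
  induction a with
  | nil => intro b i; simp [scoreIdx]
  | cons h t ih =>
      intro b i
      simp only [List.cons_append, scoreIdx, ih b (i + 1)]
      have : i + 1 + t.length = i + (h :: t).length := by simp; omega
      rw [this]
      ring

theorem scoreIdx_no_O (n : Nat) : ∀ (l : List Char) (i : Nat), (∀ ch ∈ l, ch ≠ 'O') →
    scoreIdx n i l = 0 := by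
  intro l
  induction l with
  | nil => intro i _; rfl
  | cons h t ih =>
      intro i hno
      simp [scoreIdx, hno h (by simp), ih (i + 1) (fun ch hm => hno ch (by simp [hm]))]

theorem scoreIdx_replicate_succ (n prev count : Nat) :
    scoreIdx n prev (List.replicate (count + 1) 'O')
      = scoreIdx n prev (List.replicate count 'O') + ((n : Int) - ((prev + count : Nat) : Int)) := by
  have h : List.replicate (count + 1) 'O' = List.replicate count 'O' ++ ['O'] := by
    simp [List.replicate_succ']
  rw [h, scoreIdx_append]
  simp [scoreIdx]

theorem getD_mid (a b : List Char) (h d : Char) : (a ++ h :: b).getD a.length d = h := by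
  simp [List.getD]

theorem set_mid (a b : List Char) (h c : Char) : (a ++ h :: b).set a.length c = a ++ c :: b := by
  rw [List.set_append_right _ _ (le_refl a.length)]
  simp

-- the core invariant: rolling then scoring the column equals B's direct accumulation
theorem core (n : Nat) : ∀ (rest M P : List Char) (count : Nat),
    P.length + M.length + rest.length = n →
    count ≤ M.length →
    (∀ ch ∈ M, ch ≠ 'O') →
    (∀ ch ∈ M, ch ≠ '#') →
    (pvFinish ((List.range' (P.length + M.length) rest.length).foldl pvStep
        (P ++ M ++ rest, P.length, count))).length = n ∧
    scoreIdx n 0 (pvFinish ((List.range' (P.length + M.length) rest.length).foldl pvStep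
        (P ++ M ++ rest, P.length, count)))
      = scoreIdx n 0 P + scoreIdx n P.length (List.replicate count 'O')
        + bLoop n (P.length + M.length) (P.length + count) rest := by
  intro rest
  induction rest with
  | nil =>
      intro M P count hlen0 hcnt hO hH
      simp only [List.length_nil, List.range'_zero, List.foldl_nil, pvFinish, bLoop]
      simp only [List.length_nil, Nat.add_zero] at hlen0
      by_cases h0 : 0 < count
      · have hfill : pvFill (P ++ M ++ []) P.length count
            = P ++ List.replicate count 'O' ++ M.drop count := by
          simp only [pvFill, List.append_nil, List.append_assoc]
          rw [List.take_left, List.drop_length_add_append]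
        refine ⟨?_, ?_⟩
        · rw [if_pos h0, hfill]
          simp
          omega
        · rw [if_pos h0, hfill, List.append_assoc, scoreIdx_append, scoreIdx_append,
            scoreIdx_no_O n (M.drop count) _ (fun ch hm => hO ch (List.mem_of_mem_drop hm))]
          simp only [Nat.zero_add, add_zero]
      · have hc : count = 0 := by omega
        subst hc
        refine ⟨?_, ?_⟩
        · rw [if_neg h0, List.append_nil]
          simp
          omega
        · rw [if_neg h0, List.append_nil, scoreIdx_append, scoreIdx_no_O n M _ hO]
          simp [scoreIdx]
  | cons h t ih =>
      intro M P count hlen hcnt hO hH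
      rw [List.length_cons, List.range'_succ, List.foldl_cons]
      have hlen2 : P.length + M.length = (P ++ M).length := by simp
      have hget : (P ++ M ++ h :: t).getD (P.length + M.length) ' ' = h := by
        rw [hlen2]; exact getD_mid (P ++ M) t h ' '
      by_cases hOcase : h = 'O'
      · have hstep : pvStep (P ++ M ++ h :: t, P.length, count) (P.length + M.length)
            = (P ++ (M ++ ['.']) ++ t, P.length, count + 1) := by
          simp only [pvStep]
          rw [hget, if_pos hOcase, hlen2, set_mid]
          simp
        rw [hstep]
        have hIH := ih (M ++ ['.']) P (count + 1)
          (by simp at hlen ⊢; omega) (by simp; omega)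
          (by intro ch hm; rcases List.mem_append.1 hm with hh | hh
              · exact hO ch hh
              · simp at hh; simp [hh])
          (by intro ch hm; rcases List.mem_append.1 hm with hh | hh
              · exact hH ch hh
              · simp at hh; simp [hh])
        simp only [List.length_append, List.length_cons, List.length_nil, Nat.zero_add,
          ← Nat.add_assoc] at hIH
        refine ⟨hIH.1, ?_⟩
        rw [hIH.2, hOcase, bLoop]
        rw [scoreIdx_replicate_succ]
        push_cast
        ring
      · by_cases hHcase : h = '#'
        · have hfill : pvFill (P ++ M ++ h :: t) P.length count
              = (P ++ List.replicate count 'O' ++ M.drop count ++ [h]) ++ [] ++ t := by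
            simp only [pvFill, List.append_assoc]
            rw [List.take_left, List.drop_length_add_append, List.drop_append_of_le_length hcnt]
            simp
          have hstep : pvStep (P ++ M ++ h :: t, P.length, count) (P.length + M.length)
              = ((P ++ List.replicate count 'O' ++ M.drop count ++ [h]) ++ [] ++ t,
                 P.length + M.length + 1, 0) := by
            simp only [pvStep]
            rw [hget, if_neg hOcase, if_pos hHcase, hfill]
          rw [hstep]
          have hlenP' : (P ++ List.replicate count 'O' ++ M.drop count ++ [h]).length
              = P.length + M.length + 1 := by simp; omega
          have hIH := ih [] (P ++ List.replicate count 'O' ++ M.drop count ++ [h]) 0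
            (by simp at hlen ⊢; omega) (by simp) (by simp) (by simp)
          rw [hlenP'] at hIH
          simp only [List.length_nil, Nat.add_zero] at hIH
          refine ⟨hIH.1, ?_⟩
          rw [hIH.2, hHcase, bLoop]
          have hch : ('#' : Char) ≠ 'O' := by decide
          rw [if_neg hch, if_pos rfl]
          rw [scoreIdx_append, scoreIdx_append, scoreIdx_append,
            scoreIdx_no_O n (M.drop count) _ (fun ch hm => hO ch (List.mem_of_mem_drop hm))]
          simp only [Nat.zero_add, scoreIdx, List.replicate_zero, add_zero, if_neg hch]
        · have hstep : pvStep (P ++ M ++ h :: t, P.length, count) (P.length + M.length)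
              = (P ++ (M ++ [h]) ++ t, P.length, count) := by
            simp only [pvStep]
            rw [hget, if_neg hOcase, if_neg hHcase]
            simp
          rw [hstep]
          have hIH := ih (M ++ [h]) P count
            (by simp at hlen ⊢; omega) (by simp; omega)
            (by intro ch hm; rcases List.mem_append.1 hm with hh | hh
                · exact hO ch hh
                · simp at hh; simp [hh, hOcase])
            (by intro ch hm; rcases List.mem_append.1 hm with hh | hh
                · exact hH ch hh
                · simp at hh; simp [hh, hHcase])
          simp only [List.length_append, List.length_cons, List.length_nil, Nat.zero_add,
            ← Nat.add_assoc] at hIH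
          refine ⟨hIH.1, ?_⟩
          rw [hIH.2, bLoop]
          rw [if_neg hOcase, if_neg hHcase]

theorem perCol (n : Nat) (col : List Char) (hlen : col.length = n) :
    (pvRoll n col).length = n ∧ scoreIdx n 0 (pvRoll n col) = bLoop n 0 0 col := by
  have h := core n col [] [] 0 (by simpa using hlen) (by simp) (by simp) (by simp)
  simpa [pvRoll, scoreIdx, bLoop, List.range_eq_range', hlen] using h

-- A's scoring loop over column indices computes scoreIdx
theorem ptsRow (n : Nat) : ∀ (l pre : List Char) (pts : Int),
    (List.range' pre.length l.length).foldl
      (fun (pts : Int) (c : Nat) =>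
        if (pre ++ l).getD c ' ' = 'O' then pts + ((n : Int) - (c : Int)) else pts) pts
    = pts + scoreIdx n pre.length l := by
  intro l
  induction l with
  | nil => intro pre pts; simp [scoreIdx]
  | cons h t ih =>
      intro pre pts
      rw [List.length_cons, List.range'_succ, List.foldl_cons]
      have ih' := ih (pre ++ [h]) (if h = 'O' then pts + ((n : Int) - (pre.length : Int)) else pts)
      rw [show (pre ++ [h]) ++ t = pre ++ h :: t by simp] at ih'
      simp only [List.length_append, List.length_cons, List.length_nil, Nat.zero_add] at ih'
      simp only [getD_mid]
      rw [ih', scoreIdx]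
      split_ifs <;> ring

theorem ptsRow0 (n : Nat) (row : List Char) (hlen : row.length = n) (pts : Int) :
    (List.range n).foldl
      (fun (pts : Int) (c : Nat) =>
        if row.getD c ' ' = 'O' then pts + ((n : Int) - (c : Int)) else pts) pts
    = pts + scoreIdx n 0 row := by
  subst hlen
  have h := ptsRow row.length row [] pts
  simp only [List.nil_append, List.length_nil] at h
  rw [List.range_eq_range']
  exact h

-- A's outer scoring fold over the rolled columns, as a sum over columns
theorem A_fold (n : Nat) : ∀ (cols : List (List Char)) (acc : Int),
    (∀ c ∈ cols, c.length = n) →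
    (cols.map (pvRoll n)).foldl (fun pts row =>
        (List.range n).foldl
          (fun (pts : Int) (c : Nat) =>
            if row.getD c ' ' = 'O' then pts + ((n : Int) - (c : Int)) else pts) pts) acc
    = acc + (cols.map (fun col => bLoop n 0 0 col)).sum := by
  intro cols
  induction cols with
  | nil => intro acc _; simp
  | cons col t ih =>
      intro acc hl
      have hcol := perCol n col (hl col (by simp))
      rw [List.map_cons, List.foldl_cons, List.map_cons, List.sum_cons,
        ptsRow0 n (pvRoll n col) hcol.1 acc, hcol.2,
        ih (acc + bLoop n 0 0 col) (fun c hc => hl c (by simp [hc]))]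
      ring

-- B's inner fold over the enumerated lines computes bLoop on the column
theorem B_inner (R j : Nat) : ∀ (ls : List String) (i nf : Nat) (tot : Int),
    ((List.zipIdx ls i).foldl (fun (st : Int × Nat) li =>
        if li.1.toList.getD j ' ' = 'O' then (st.1 + ((R : Int) - (st.2 : Int)), st.2 + 1)
        else if li.1.toList.getD j ' ' = '#' then (st.1, li.2 + 1)
        else st) (tot, nf)).1
    = tot + bLoop R i nf (ls.map (fun l => l.toList.getD j ' ')) := by
  intro ls
  induction ls with
  | nil => intro i nf tot; simp [bLoop]
  | cons l t ih =>
      intro i nf tot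
      rw [List.zipIdx_cons, List.foldl_cons, List.map_cons, bLoop]
      split_ifs with h1 h2
      · rw [ih (i + 1) (nf + 1) (tot + ((R : Int) - (nf : Int)))]
        ring
      · rw [ih (i + 1) (i + 1) tot]
      · rw [ih (i + 1) nf tot]

-- B's outer fold over the column indices, as the same sum over columns
theorem B_fold (R : Nat) (ls : List String) : ∀ (js : List Nat) (total : Int),
    js.foldl (fun total j =>
      ((List.zipIdx ls).foldl (fun (st : Int × Nat) li =>
          if li.1.toList.getD j ' ' = 'O' then (st.1 + ((R : Int) - (st.2 : Int)), st.2 + 1)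
          else if li.1.toList.getD j ' ' = '#' then (st.1, li.2 + 1)
          else st) (total, 0)).1) total
    = total + (js.map (fun j => bLoop R 0 0 (ls.map (fun l => l.toList.getD j ' ')))).sum := by
  intro js
  induction js with
  | nil => intro total; simp
  | cons j t ih =>
      intro total
      rw [List.foldl_cons, List.map_cons, List.sum_cons, B_inner R j ls 0 0 total, ih]
      ring

-- ===== VERDICT (by name: the statement is the Claim_ definition above) =====
theorem total_load_spec : Claim_equal_total_load := by
  unfold Claim_equal_total_load
  intro input _
  unfold Spec_total_load
  cases input with
  | nil => rfl
  | cons s rest =>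
      simp only [total_load, total_load_alt, pvZipStar]
      rw [if_neg (by simp : ¬(s :: rest).length = 0)]
      have hC : (((s :: rest).map (fun line => line.toList)).map List.length).min?
          = ((s :: rest).map (fun l => l.toList.length)).min? := by
        rw [List.map_map]
        rfl
      rw [hC]
      set inp := s :: rest with hinp
      set C := (((inp.map (fun l => l.toList.length)).min?).getD 0) with hCdef
      set colFn := fun j => (inp.map (fun line => line.toList)).map (fun row => row.getD j ' ')
        with hcolFn
      rcases Nat.eq_zero_or_pos C with hC0 | hCpos
      · rw [hC0]
        simp
      · obtain ⟨k, hk⟩ : ∃ k, C = k + 1 := ⟨C - 1, by omega⟩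
        have hhead : ((List.range C).map colFn).headD [] = colFn 0 := by
          rw [hk, List.range_succ_eq_map, List.map_cons, List.headD_cons]
        rw [hhead]
        have hlencol : ∀ j, (colFn j).length = inp.length := by
          intro j; simp [hcolFn]
        rw [hlencol 0]
        rw [A_fold inp.length ((List.range C).map colFn) 0
          (by intro c hc
              rcases List.mem_map.1 hc with ⟨j, _, rfl⟩
              exact hlencol j)]
        rw [B_fold inp.length inp (List.range C) 0]
        simp only [zero_add, List.map_map]
        congr 1
        apply List.map_congr_left
        intro j _
        simp only [Function.comp, hcolFn, List.map_map]
        rfl
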